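-- pv_equiv track=rewrite | github.com/audreyngnn/Business-Analytics-Projects | Data Analytics Projects/COMP6010/COMP6010_Assignment2/assignment1_48144134.py | sum_two_lowest
-- ===== SOURCE A (Python) =====
-- def sum_two_lowest(s : str):
--     """
--     (12.5 marks)
--     Given a string, find the two characters with the two lowest ascii values
--     in the string and return the sum of their ascii values
--     """
--     if not isinstance(s, str):  # type check
--         return None
--
--     # Give an initial value (highest possible ASCII value) to 2 lowest variables
--     lowest_1 = chr(127)
--     lowest_2 = chr(127)
--
--     # Loop through the string to find the two lowest characters
--     for char in s:
--         if ord(char) < ord(lowest_1): # find the lowest ascii value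
--             lowest_2 = lowest_1
--             lowest_1 = char
--
--         elif ord(char) < ord(lowest_2): # find the second lowest ascii value
--             lowest_2 = char
--
--     ascii_sum = ord(lowest_1) + ord(lowest_2) # calculate the sum
--
--     return ascii_sum  # return the final result
-- ===== SOURCE B (Python) =====
-- def sum_two_lowest(s : str):
--     if not isinstance(s, str):  # type check
--         return None
--     # codes of all characters plus the two 127 sentinels A also starts from
--     vals = sorted([ord(c) for c in s] + [127, 127])
--     return vals[0] + vals[1]
-- ===== Notes on version B (the rewrite author's own statement) =====
-- stated objective: simpler
-- what changed: Replaces the running two-minimum scan with explicit lowest_1/lowest_2 tracker variables by collecting all character codes plus the two 127 sentinel values, sorting, and summing the first two elements.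
import Mathlib
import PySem

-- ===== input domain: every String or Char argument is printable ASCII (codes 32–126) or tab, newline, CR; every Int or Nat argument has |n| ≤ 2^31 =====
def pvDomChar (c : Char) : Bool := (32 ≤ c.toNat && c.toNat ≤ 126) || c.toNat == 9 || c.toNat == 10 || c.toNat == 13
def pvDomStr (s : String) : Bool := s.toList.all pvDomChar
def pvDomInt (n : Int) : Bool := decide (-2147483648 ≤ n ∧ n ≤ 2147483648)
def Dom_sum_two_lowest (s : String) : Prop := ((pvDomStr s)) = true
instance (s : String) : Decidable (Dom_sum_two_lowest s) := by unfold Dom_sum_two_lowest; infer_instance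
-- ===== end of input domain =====

-- B replaces A's running two-minimum tracker scan by sorting the character codes plus the two 127 sentinels and summing the first two; same values, different algorithm (simpler, not faster).


-- ===== PORT A =====
-- literal port: two trackers starting at chr(127), one pass updating (lowest_1, lowest_2)
def sum_two_lowest (s : String) : Int :=
  let p := s.toList.foldl
    (fun (st : Int × Int) (c : Char) =>
      if (c.toNat : Int) < st.1 then ((c.toNat : Int), st.1)
      else if (c.toNat : Int) < st.2 then (st.1, (c.toNat : Int))
      else st)
    (127, 127)
  p.1 + p.2

-- ===== PORT B =====
-- literal port of Source B: sort the codes plus the two 127 sentinels, sum the first two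
def sum_two_lowest_alt (s : String) : Int :=
  let vals := PySem.List.sorted (s.toList.map (fun c => (c.toNat : Int)) ++ [127, 127]) (fun x => x)
  match vals with
  | a :: b :: _ => a + b
  | _ => 0  -- unreachable: vals always has at least the two sentinels

-- ===== PRECONDITION & SPEC =====
def Spec_sum_two_lowest (s : String) (out : Int) : Prop := out = sum_two_lowest_alt s
instance (s : String) (out : Int) : Decidable (Spec_sum_two_lowest s out) := by unfold Spec_sum_two_lowest; infer_instance

-- ===== CLAIM (what is proved, stated in full; the proofs are below) =====
def Claim_equal_sum_two_lowest : Prop := ∀ (s : String), Dom_sum_two_lowest s → Spec_sum_two_lowest s (sum_two_lowest s)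

-- ===== LEMMAS AND PROOFS =====

-- A's loop body, over the already-extracted integer codes
def pvStep (st : Int × Int) (x : Int) : Int × Int :=
  if x < st.1 then (x, st.1) else if x < st.2 then (st.1, x) else st

-- the second element of the sorted list is ≤ one of any two designated members
lemma pv_second_le (u v : Int) (l r : List Int) (p1 p2 : Int)
    (h : PySem.List.sorted (u :: v :: l) (fun x => x) = p1 :: p2 :: r) :
    p2 ≤ u ∨ p2 ≤ v := by
  by_contra hc
  have hu : u < p2 := by omega
  have hv : v < p2 := by omega
  have hperm : (p1 :: p2 :: r).Perm (u :: v :: l) := by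
    rw [← h]; exact PySem.List.sorted_perm _ _ _
  have hpw := PySem.List.sorted_pairwise (u :: v :: l) (fun x => x)
  rw [h] at hpw
  have h2r : ∀ y ∈ r, p2 ≤ y := (List.pairwise_cons.mp (List.pairwise_cons.mp hpw).2).1
  have hcnt := hperm.countP_eq (fun y => decide (y < p2))
  have hzero : List.countP (fun y => decide (y < p2)) r = 0 := by
    apply List.countP_eq_zero.mpr
    intro y hy
    simp [not_lt.mpr (h2r y hy)]
  have hL : List.countP (fun y => decide (y < p2)) (p1 :: p2 :: r) ≤ 1 := by
    simp [List.countP_cons, hzero]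
    split_ifs <;> omega
  have hR : 2 ≤ List.countP (fun y => decide (y < p2)) (u :: v :: l) := by
    simp [hu, hv]
  omega

-- adding an element ≥ the current second minimum keeps the first two of the sorted list
lemma pv_insert_big (l r : List Int) (p1 p2 c : Int)
    (h : PySem.List.sorted l (fun x => x) = p1 :: p2 :: r) (hc : p2 ≤ c) :
    PySem.List.sorted (c :: l) (fun x => x) =
      p1 :: p2 :: PySem.List.sorted (c :: r) (fun x => x) := by
  have hpw := PySem.List.sorted_pairwise l (fun x => x)
  rw [h] at hpw
  have hp12 : p1 ≤ p2 := (List.pairwise_cons.mp hpw).1 p2 (by simp)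
  have h1r : ∀ y ∈ r, p1 ≤ y := fun y hy => (List.pairwise_cons.mp hpw).1 y (by simp [hy])
  have h2r : ∀ y ∈ r, p2 ≤ y := (List.pairwise_cons.mp (List.pairwise_cons.mp hpw).2).1
  apply PySem.List.sorted_id_eq_of_perm_of_pairwise
  · -- permutation
    have hcr : (PySem.List.sorted (c :: r) (fun x => x)).Perm (c :: r) :=
      PySem.List.sorted_perm _ _ _
    have hl : (p1 :: p2 :: r).Perm l := by
      rw [← h]; exact PySem.List.sorted_perm _ _ _
    exact ((hcr.cons p2).cons p1).trans
      ((((List.Perm.swap c p2 r).cons p1).trans (List.Perm.swap c p1 (p2 :: r))).trans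
        (hl.cons c))
  · -- pairwise ≤
    have hmem : ∀ y ∈ PySem.List.sorted (c :: r) (fun x => x), p2 ≤ y := by
      intro y hy
      have := (PySem.List.mem_sorted (c :: r) (fun x => x) false y).mp hy
      simp only [List.mem_cons] at this
      rcases this with rfl | hyr
      · exact hc
      · exact h2r y hyr
    refine List.pairwise_cons.mpr ⟨?_, List.pairwise_cons.mpr
      ⟨hmem, PySem.List.sorted_pairwise (c :: r) (fun x => x)⟩⟩
    intro y hy
    simp only [List.mem_cons] at hy
    rcases hy with rfl | hy
    · exact hp12
    · exact le_trans hp12 (hmem y hy)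

-- invariant: the fold's two trackers are the first two of the sorted list (sentinels included)
lemma pv_fold_sorted : ∀ (xs : List Int) (a b : Int), a ≤ b →
    ∃ r, PySem.List.sorted (a :: b :: xs) (fun x => x) =
      (xs.foldl pvStep (a, b)).1 :: (xs.foldl pvStep (a, b)).2 :: r := by
  intro xs
  induction xs with
  | nil =>
    intro a b hab
    refine ⟨[], ?_⟩
    rw [PySem.List.sorted_eq_self_of_pairwise]
    · rfl
    · simp [hab]
  | cons x xs ih =>
    intro a b hab
    have hinj : Function.Injective (fun x : Int => x) := fun _ _ h => h
    by_cases hxa : x < a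
    · obtain ⟨r, hr⟩ := ih x a (le_of_lt hxa)
      have hle : (xs.foldl pvStep (x, a)).2 ≤ b := by
        rcases pv_second_le x a xs r _ _ hr with h' | h'
        · exact le_trans h' (le_trans (le_of_lt hxa) hab)
        · exact le_trans h' hab
      have h2 := pv_insert_big (x :: a :: xs) r _ _ b hr hle
      have hperm : (a :: b :: x :: xs).Perm (b :: x :: a :: xs) :=
        (List.Perm.swap b a (x :: xs)).trans ((List.Perm.swap x a xs).cons b)
      rw [PySem.List.sorted_eq_sorted_of_perm _ _ _ hinj hperm, h2]
      refine ⟨PySem.List.sorted (b :: r) (fun x => x), ?_⟩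
      simp [List.foldl_cons, pvStep, hxa]
    · by_cases hxb : x < b
      · have hax : a ≤ x := not_lt.mp hxa
        obtain ⟨r, hr⟩ := ih a x hax
        have hle : (xs.foldl pvStep (a, x)).2 ≤ b := by
          rcases pv_second_le a x xs r _ _ hr with h' | h'
          · exact le_trans h' (le_trans hax (le_of_lt hxb))
          · exact le_trans h' (le_of_lt hxb)
        have h2 := pv_insert_big (a :: x :: xs) r _ _ b hr hle
        have hperm : (a :: b :: x :: xs).Perm (b :: a :: x :: xs) := List.Perm.swap b a _
        rw [PySem.List.sorted_eq_sorted_of_perm _ _ _ hinj hperm, h2]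
        refine ⟨PySem.List.sorted (b :: r) (fun x => x), ?_⟩
        simp [List.foldl_cons, pvStep, hxa, hxb]
      · have hbx : b ≤ x := not_lt.mp hxb
        obtain ⟨r, hr⟩ := ih a b hab
        have hle : (xs.foldl pvStep (a, b)).2 ≤ x := by
          rcases pv_second_le a b xs r _ _ hr with h' | h'
          · exact le_trans h' (le_trans hab hbx)
          · exact le_trans h' hbx
        have h2 := pv_insert_big (a :: b :: xs) r _ _ x hr hle
        have hperm : (a :: b :: x :: xs).Perm (x :: a :: b :: xs) :=
          (((List.Perm.swap x b xs).cons a)).trans (List.Perm.swap x a (b :: xs))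
        rw [PySem.List.sorted_eq_sorted_of_perm _ _ _ hinj hperm, h2]
        refine ⟨PySem.List.sorted (x :: r) (fun x => x), ?_⟩
        simp [List.foldl_cons, pvStep, hxa, hxb]

-- ===== VERDICT (by name: the statement is the Claim_ definition above) =====
theorem sum_two_lowest_spec : Claim_equal_sum_two_lowest := by
  intro s _
  unfold Spec_sum_two_lowest sum_two_lowest sum_two_lowest_alt
  set xs := s.toList.map (fun c => (c.toNat : Int)) with hxs
  have hfold : s.toList.foldl
      (fun (st : Int × Int) (c : Char) =>
        if (c.toNat : Int) < st.1 then ((c.toNat : Int), st.1)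
        else if (c.toNat : Int) < st.2 then (st.1, (c.toNat : Int))
        else st)
      ((127 : Int), (127 : Int)) = xs.foldl pvStep (127, 127) := by
    rw [hxs, List.foldl_map]
    rfl
  have hperm : (xs ++ [(127 : Int), 127]).Perm ((127 : Int) :: 127 :: xs) :=
    List.perm_append_comm
  have hinj : Function.Injective (fun x : Int => x) := fun _ _ h => h
  obtain ⟨r, hr⟩ := pv_fold_sorted xs 127 127 le_rfl
  simp only [hfold,
    PySem.List.sorted_eq_sorted_of_perm _ _ _ hinj hperm, hr]
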